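-- pv_equiv track=rewrite | github.com/PersonaNexus/personanexus | src/personanexus/diff.py | _field_to_impact_category
-- ===== SOURCE A (Python) =====
-- _IMPACT_CATEGORIES: dict[str, str] = {
--     "personality": "behavioral",
--     "behavior": "behavioral",
--     "guardrails": "safety",
--     "principles": "safety",
--     "metadata": "structural",
--     "schema_version": "structural",
--     "extends": "structural",
--     "mixins": "structural",
--     "role": "structural",
--     "evolution": "structural",
--     "evaluation": "structural",
--     "composition": "structural",
--     "communication": "cosmetic",
--     "presentation": "cosmetic",
--     "expertise": "behavioral",
--     "memory": "structural",
--     "narrative": "cosmetic",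
--     "behavioral_modes": "behavioral",
--     "interaction": "behavioral",
-- }
--
-- def _field_to_impact_category(field: str) -> str:
--     """Map a dotted field name to an impact category."""
--     # Check full prefixes from most specific to least
--     parts = field.split(".")
--     for i in range(len(parts), 0, -1):
--         prefix = ".".join(parts[:i])
--         if prefix in _IMPACT_CATEGORIES:
--             return _IMPACT_CATEGORIES[prefix]
--     # Fallback: check just the top-level key
--     top_key = parts[0] if parts else ""
--     return _IMPACT_CATEGORIES.get(top_key, "structural")
-- ===== SOURCE B (Python) =====
-- # Reversed mapping: category -> set of top-level keys; one membership chain, no dict.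
-- _SAFETY_KEYS = frozenset({"guardrails", "principles"})
-- _BEHAVIORAL_KEYS = frozenset({"personality", "behavior", "expertise",
--                               "behavioral_modes", "interaction"})
-- _COSMETIC_KEYS = frozenset({"communication", "presentation", "narrative"})
--
--
-- def _field_to_impact_category(field: str) -> str:
--     """Map a dotted field name to an impact category."""
--     # No dictionary key contains a dot, so only the token before the first
--     # dot can ever match; everything else falls back to "structural".
--     top = field.partition(".")[0]
--     if top in _SAFETY_KEYS:
--         return "safety"
--     if top in _BEHAVIORAL_KEYS:
--         return "behavioral"
--     if top in _COSMETIC_KEYS: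
--         return "cosmetic"
--     return "structural"
-- ===== Notes on version B (the rewrite author's own statement) =====
-- stated objective: simpler
-- what changed: Replaced the most-specific-to-least-specific prefix scan over a key->category dict (split, join, membership probe per prefix) with the inverted data structure: three category->key frozensets probed once with the token before the first dot; exact because no dict key contains a dot and every unlisted key maps to the default 'structural'.
import Mathlib
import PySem

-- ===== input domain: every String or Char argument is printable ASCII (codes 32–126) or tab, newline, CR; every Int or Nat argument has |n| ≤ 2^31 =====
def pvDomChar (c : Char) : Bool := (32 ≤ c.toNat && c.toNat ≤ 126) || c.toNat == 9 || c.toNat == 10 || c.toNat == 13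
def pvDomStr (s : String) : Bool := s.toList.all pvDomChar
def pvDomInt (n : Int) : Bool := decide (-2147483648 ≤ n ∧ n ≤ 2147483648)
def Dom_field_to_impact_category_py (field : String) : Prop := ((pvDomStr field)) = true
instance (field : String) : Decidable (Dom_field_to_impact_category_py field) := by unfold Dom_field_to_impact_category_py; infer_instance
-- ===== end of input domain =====

-- B inverts the data structure: instead of A's most-specific-to-least-specific prefix scan over a
-- key->category dict, B probes three category->key sets once with the token before the first '.',
-- exact because no dictionary key contains a dot and unlisted keys map to "structural" (objective: simpler).

-- ===== PORT A =====
-- the module-level _IMPACT_CATEGORIES dict literal (distinct keys, insertion order)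
def pvImpactCategories : PySem.Dict String String := PySem.Dict.mk
  [("personality", "behavioral"), ("behavior", "behavioral"), ("guardrails", "safety"),
   ("principles", "safety"), ("metadata", "structural"), ("schema_version", "structural"),
   ("extends", "structural"), ("mixins", "structural"), ("role", "structural"),
   ("evolution", "structural"), ("evaluation", "structural"), ("composition", "structural"),
   ("communication", "cosmetic"), ("presentation", "cosmetic"), ("expertise", "behavioral"),
   ("memory", "structural"), ("narrative", "cosmetic"), ("behavioral_modes", "behavioral"),
   ("interaction", "behavioral")]

-- the 'for i in range(len(parts), 0, -1)' loop with its early return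
def pvPrefixLoop (parts : List String) : List Int → Option String
  | [] => none
  | i :: rest =>
      let pre := PySem.Str.join "." (PySem.List.slice parts none (some i))  -- ".".join(parts[:i])
      if pvImpactCategories.contains pre then pvImpactCategories.get? pre  -- return d[prefix] (key present)
      else pvPrefixLoop parts rest

def field_to_impact_category_py (field : String) : String :=
  let parts := (PySem.Str.split? field ".").getD []  -- field.split("."); sep ≠ "" so always `some`
  match pvPrefixLoop parts (PySem.List.pyRange (parts.length : Int) 0 (-1)) with
  | some v => v
  | none =>
      let topKey := match parts with | [] => "" | p :: _ => p  -- parts[0] if parts else ""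
      pvImpactCategories.getD topKey "structural"

-- ===== PORT B =====
-- the three module-level frozenset literals of Source B
def pvSafetyKeys : PySem.Set String := PySem.Set.ofList ["guardrails", "principles"]
def pvBehavioralKeys : PySem.Set String :=
  PySem.Set.ofList ["personality", "behavior", "expertise", "behavioral_modes", "interaction"]
def pvCosmeticKeys : PySem.Set String := PySem.Set.ofList ["communication", "presentation", "narrative"]

def field_to_impact_category_py_alt (field : String) : String :=
  -- field.partition(".")[0] — for the 1-char separator this is exactly the chars before the first '.'
  let top := String.ofList (field.toList.takeWhile (fun c => c != '.'))
  if PySem.Set.contains pvSafetyKeys top then "safety"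
  else if PySem.Set.contains pvBehavioralKeys top then "behavioral"
  else if PySem.Set.contains pvCosmeticKeys top then "cosmetic"
  else "structural"

-- ===== PRECONDITION & SPEC =====
def Spec_field_to_impact_category_py (field : String) (out : String) : Prop := out = field_to_impact_category_py_alt field
instance (field : String) (out : String) : Decidable (Spec_field_to_impact_category_py field out) := by unfold Spec_field_to_impact_category_py; infer_instance

-- ===== CLAIM (what is proved, stated in full; the proofs are below) =====
def Claim_equal_field_to_impact_category_py : Prop := ∀ (field : String), Dom_field_to_impact_category_py field → Spec_field_to_impact_category_py field (field_to_impact_category_py field)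

-- ===== LEMMAS AND PROOFS =====

-- splitOn.go prepends its accumulator (reversed) to the result
theorem pvGoAcc (sep : List Char) (fuel : Nat) (l cur : List Char) (acc : List (List Char)) :
    PySem.Chars.splitOn.go sep fuel l cur acc = acc.reverse ++ PySem.Chars.splitOn.go sep fuel l cur [] := by
  induction fuel generalizing l cur acc with
  | zero => rw [PySem.Chars.splitOn.go.eq_def, PySem.Chars.splitOn.go.eq_def]; simp
  | succ f ih =>
    cases l with
    | nil => rw [PySem.Chars.splitOn.go.eq_def, PySem.Chars.splitOn.go.eq_def]; simp
    | cons c rest =>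
      rw [PySem.Chars.splitOn.go.eq_def]
      conv_rhs => rw [PySem.Chars.splitOn.go.eq_def]
      by_cases h : sep.isPrefixOf (c :: rest) = true
      · simp only [h, if_pos]
        rw [ih _ _ (cur.reverse :: []), ih _ _ (cur.reverse :: acc)]
        simp
      · simp only [h, if_neg, Bool.false_eq_true, not_false_iff]
        rw [ih rest (c :: cur) acc]

-- the first piece splitOn.go produces is everything before the first '.'
theorem pvGoHead (fuel : Nat) (l cur : List Char) (h : l.length < fuel) :
    (PySem.Chars.splitOn.go ['.'] fuel l cur []).head? = some (cur.reverse ++ l.takeWhile (· != '.')) := by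
  induction fuel generalizing l cur with
  | zero => omega
  | succ f ih =>
    cases l with
    | nil => rw [PySem.Chars.splitOn.go.eq_def]; simp
    | cons c rest =>
      rw [PySem.Chars.splitOn.go.eq_def]
      by_cases hc : c = '.'
      · subst hc
        have hp : List.isPrefixOf ['.'] ('.' :: rest) = true := by simp [List.isPrefixOf]
        simp only [hp, if_pos]
        rw [pvGoAcc]
        simp [List.takeWhile]
      · have hp : List.isPrefixOf ['.'] (c :: rest) = false := by
          simp [List.isPrefixOf]; exact fun hh => (hc hh.symm).elim
        simp only [hp, Bool.false_eq_true, if_neg, not_false_iff]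
        rw [ih rest (c :: cur) (by simp at h ⊢; omega)]
        have hb : (c != '.') = true := by simp [hc]
        simp [List.takeWhile, hb]

-- a key list without dots never matches a dotted string
theorem pvGetNoneOfDotFreeKeys (lst : List (String × String)) (s : String) (h : '.' ∈ s.toList)
    (hk : ∀ p ∈ lst, '.' ∉ p.1.toList) : (PySem.Dict.mk lst).get? s = none := by
  induction lst with
  | nil => rfl
  | cons p rest ih =>
    obtain ⟨k, v⟩ := p
    rw [PySem.Dict.get?_mk_cons]
    have hne : (k == s) = false := by
      refine beq_eq_false_iff_ne.mpr ?_
      intro he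
      exact hk (k, v) (List.mem_cons_self) (he ▸ h)
    rw [hne]
    simp only [Bool.false_eq_true, if_neg, not_false_iff]
    exact ih (fun q hq => hk q (List.mem_cons_of_mem _ hq))

-- no key of the dict contains a dot, so a dotted string is never found
theorem pvGetDotNone (s : String) (h : '.' ∈ s.toList) : pvImpactCategories.get? s = none :=
  pvGetNoneOfDotFreeKeys _ s h (by decide)

theorem pvContainsDotFalse (s : String) (h : '.' ∈ s.toList) : pvImpactCategories.contains s = false := by
  rw [PySem.Dict.contains_eq_isSome_get?, pvGetDotNone s h]
  rfl

-- every index ≥ 2 of the loop probes a joined prefix that contains a '.', so it never matches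
theorem pvLoopSkip (parts : List String) (is js : List Int)
    (hall : ∀ i ∈ is, 2 ≤ i ∧ i ≤ (parts.length : Int)) :
    pvPrefixLoop parts (is ++ js) = pvPrefixLoop parts js := by
  induction is with
  | nil => simp
  | cons i rest ih =>
    obtain ⟨h2, hle⟩ := hall i (by simp)
    rw [List.cons_append, pvPrefixLoop]
    have hsl : PySem.List.slice parts none (some i) = parts.take i.toNat :=
      PySem.List.slice_to parts (by omega)
    have hlen : 2 ≤ (parts.take i.toNat).length := by
      rw [List.length_take]
      omega
    obtain ⟨x, y, t, htake⟩ : ∃ x y t, parts.take i.toNat = x :: y :: t := by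
      cases hx : parts.take i.toNat with
      | nil => rw [hx] at hlen; simp at hlen
      | cons a tl =>
        cases hx' : tl with
        | nil => rw [hx, hx'] at hlen; simp at hlen
        | cons b tl' => exact ⟨a, b, tl', by simp_all⟩
    have hdot : '.' ∈ (PySem.Str.join "." (PySem.List.slice parts none (some i))).toList := by
      rw [hsl, htake]
      simp only [PySem.Str.join, List.map_cons]
      rw [show ".".toList = ['.'] from rfl, PySem.Chars.join_cons_cons]
      simp
    rw [pvContainsDotFalse _ hdot]
    simp only [Bool.false_eq_true, if_neg, not_false_iff]
    exact ih (fun j hj => hall j (by simp [hj]))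

-- what the full loop computes: its only possible hit is the first token
theorem pvLoopOne (p : String) (rest : List String) :
    pvPrefixLoop (p :: rest) [1] =
      (if pvImpactCategories.contains p then pvImpactCategories.get? p else none) := by
  rw [pvPrefixLoop]
  have hsl : PySem.List.slice (p :: rest) none (some (1 : Int)) = [p] := by
    rw [PySem.List.slice_to _ (by omega)]
    rfl
  have hpre : PySem.Str.join "." (PySem.List.slice (p :: rest) none (some (1 : Int))) = p := by
    rw [hsl]
    simp only [PySem.Str.join, List.map_cons, List.map_nil]
    rw [PySem.Chars.join_singleton]
    simp
  rw [hpre, pvPrefixLoop]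

-- A's single dict lookup (with its 'contains' guard) agrees with B's membership chain on any token
theorem pvLookupEqBranches (p : String) :
    (match (if pvImpactCategories.contains p then pvImpactCategories.get? p else none) with
      | some v => v
      | none => pvImpactCategories.getD p "structural") =
    (if PySem.Set.contains pvSafetyKeys p then "safety"
     else if PySem.Set.contains pvBehavioralKeys p then "behavioral"
     else if PySem.Set.contains pvCosmeticKeys p then "cosmetic"
     else "structural") := by
  by_cases h1 : p = "personality"; · subst h1; decide
  by_cases h2 : p = "behavior"; · subst h2; decide
  by_cases h3 : p = "guardrails"; · subst h3; decide
  by_cases h4 : p = "principles"; · subst h4; decide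
  by_cases h5 : p = "metadata"; · subst h5; decide
  by_cases h6 : p = "schema_version"; · subst h6; decide
  by_cases h7 : p = "extends"; · subst h7; decide
  by_cases h8 : p = "mixins"; · subst h8; decide
  by_cases h9 : p = "role"; · subst h9; decide
  by_cases h10 : p = "evolution"; · subst h10; decide
  by_cases h11 : p = "evaluation"; · subst h11; decide
  by_cases h12 : p = "composition"; · subst h12; decide
  by_cases h13 : p = "communication"; · subst h13; decide
  by_cases h14 : p = "presentation"; · subst h14; decide
  by_cases h15 : p = "expertise"; · subst h15; decide
  by_cases h16 : p = "memory"; · subst h16; decide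
  by_cases h17 : p = "narrative"; · subst h17; decide
  by_cases h18 : p = "behavioral_modes"; · subst h18; decide
  by_cases h19 : p = "interaction"; · subst h19; decide
  -- p matches no key: both sides are "structural"
  simp [pvImpactCategories, pvSafetyKeys, pvBehavioralKeys, pvCosmeticKeys,
        PySem.Dict.contains, PySem.Dict.get?, PySem.Dict.getD, PySem.Set.contains,
        PySem.Set.ofList, PySem.Set.add,
        h1, h2, h3, h4, h13, h14, h15, h17, h18, h19,
        Ne.symm h1, Ne.symm h2, Ne.symm h3, Ne.symm h4, Ne.symm h5, Ne.symm h6, Ne.symm h7,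
        Ne.symm h8, Ne.symm h9, Ne.symm h10, Ne.symm h11, Ne.symm h12, Ne.symm h13,
        Ne.symm h14, Ne.symm h15, Ne.symm h16, Ne.symm h17, Ne.symm h18, Ne.symm h19]

-- the verdict
theorem field_to_impact_category_py_spec : Claim_equal_field_to_impact_category_py := by
  unfold Claim_equal_field_to_impact_category_py
  intro field _
  unfold Spec_field_to_impact_category_py
  simp only [field_to_impact_category_py, field_to_impact_category_py_alt]
  -- identify parts and its head
  have hhead : (PySem.Chars.splitOn field.toList ['.']).head? =
      some (field.toList.takeWhile (· != '.')) := by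
    rw [PySem.Chars.splitOn]
    have := pvGoHead (field.toList.length + 1) field.toList [] (by omega)
    simpa using this
  obtain ⟨crest, hcseq⟩ := List.head?_eq_some_iff.mp hhead
  set p : String := String.ofList (field.toList.takeWhile (· != '.')) with hp
  have hparts : (PySem.Str.split? field ".").getD [] = p :: crest.map String.ofList := by
    simp [PySem.Str.split?, PySem.Chars.split?, hcseq, hp]
  rw [hparts]
  -- decompose the countdown range as (indices ≥ 2) ++ [1]
  set n : Int := ((p :: crest.map String.ofList).length : Int) with hn
  have hn1 : 1 ≤ n := by simp [hn]
  have hrange : PySem.List.pyRange n 0 (-1) = (PySem.List.pyRange 2 (n + 1) 1).reverse ++ [1] := by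
    rw [PySem.List.pyRange_neg_one_eq_reverse]
    rw [show (0 : Int) + 1 = 1 from rfl]
    rw [PySem.List.pyRange_one_cons (by omega)]
    simp
  rw [hrange, pvLoopSkip _ _ _ (by
    intro i hi
    rw [List.mem_reverse, PySem.List.mem_pyRange_one] at hi
    exact ⟨hi.1, by rw [← hn]; omega⟩)]
  rw [pvLoopOne]
  exact pvLookupEqBranches p
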